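-- pv_equiv track=rewrite | github.com/supernova576/the_knowledge_mapping | app.py | _find_todo_index_by_id
-- ===== SOURCE A (Python) =====
-- def _find_todo_index_by_id(todos: list[dict], todo_id: str) -> int:
--     if not str(todo_id).strip().isdigit():
--         return -1
--     target_id = str(int(str(todo_id).strip()))
--     for index, _todo in enumerate(todos, start=1):
--         if str(index) == target_id:
--             return index - 1
--     return -1
-- ===== SOURCE B (Python) =====
-- def _find_todo_index_by_id(todos: list, todo_id: str) -> int:
--     s = str(todo_id).strip()
--     if not s.isdigit():
--         return -1
--     t = int(s)
--     return t - 1 if 1 <= t <= len(todos) else -1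
-- ===== Notes on version B (the rewrite author's own statement) =====
-- stated objective: simpler
-- what changed: Replaces the linear scan over enumerate(todos) (whose comparison str(index)==target can only match at index==int(id)) with a direct arithmetic bounds check: t-1 if 1<=t<=len(todos) else -1.
import Mathlib
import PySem

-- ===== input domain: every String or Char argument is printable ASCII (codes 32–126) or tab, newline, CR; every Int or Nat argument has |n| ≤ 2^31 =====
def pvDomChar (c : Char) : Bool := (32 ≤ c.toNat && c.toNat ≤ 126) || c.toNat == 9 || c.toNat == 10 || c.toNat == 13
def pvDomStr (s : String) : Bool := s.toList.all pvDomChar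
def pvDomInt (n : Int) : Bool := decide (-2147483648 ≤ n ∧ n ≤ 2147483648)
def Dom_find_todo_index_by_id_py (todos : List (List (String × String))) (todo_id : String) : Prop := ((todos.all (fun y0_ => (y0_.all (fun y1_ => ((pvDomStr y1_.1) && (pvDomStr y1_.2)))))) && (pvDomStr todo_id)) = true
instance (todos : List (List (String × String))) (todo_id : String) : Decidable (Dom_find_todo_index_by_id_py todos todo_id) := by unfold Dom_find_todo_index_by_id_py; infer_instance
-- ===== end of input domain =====

-- ===== PORT A =====
-- B replaces A's linear scan with a direct arithmetic bounds check; the return values are proved equal on the whole domain.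
-- for index, _todo in enumerate(todos, start=1): if str(index) == target_id: return index - 1 / return -1
def find_todo_index_by_id_loop (todos : List (List (String × String))) (target : String) (index : Int) : Int :=
  match todos with
  | [] => -1
  | _ :: rest =>
    if PySem.Int.toStr index == target then index - 1
    else find_todo_index_by_id_loop rest target (index + 1)

def find_todo_index_by_id_py (todos : List (List (String × String))) (todo_id : String) : Int :=
  if !(PySem.Str.strIsdigit (PySem.Str.strip todo_id)) then -1
  else
    -- target_id = str(int(str(todo_id).strip())); int() cannot raise here (isdigit just held), so `getD 0` never takes its default
    find_todo_index_by_id_loop todos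
      (PySem.Int.toStr ((PySem.Int.ofStr? (PySem.Str.strip todo_id)).getD 0)) 1

-- ===== PORT B =====
def find_todo_index_by_id_py_alt (todos : List (List (String × String))) (todo_id : String) : Int :=
  if PySem.Str.strIsdigit (PySem.Str.strip todo_id) then
    -- t = int(s); s.isdigit() holds, so `getD 0` never takes its default
    if 1 ≤ (PySem.Int.ofStr? (PySem.Str.strip todo_id)).getD 0 ∧
        (PySem.Int.ofStr? (PySem.Str.strip todo_id)).getD 0 ≤ (todos.length : Int) then
      (PySem.Int.ofStr? (PySem.Str.strip todo_id)).getD 0 - 1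
    else -1
  else -1

-- ===== PRECONDITION & SPEC =====
def Spec_find_todo_index_by_id_py (todos : List (List (String × String))) (todo_id : String) (out : Int) : Prop := out = find_todo_index_by_id_py_alt todos todo_id
instance (todos : List (List (String × String))) (todo_id : String) (out : Int) : Decidable (Spec_find_todo_index_by_id_py todos todo_id out) := by unfold Spec_find_todo_index_by_id_py; infer_instance

-- ===== CLAIM (what is proved, stated in full; the proofs are below) =====
def Claim_equal_find_todo_index_by_id_py : Prop := ∀ (todos : List (List (String × String))) (todo_id : String), Dom_find_todo_index_by_id_py todos todo_id → Spec_find_todo_index_by_id_py todos todo_id (find_todo_index_by_id_py todos todo_id)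

-- ===== LEMMAS AND PROOFS =====

theorem digitChar_inj {a b : Nat} (ha : a < 10) (hb : b < 10) (h : Nat.digitChar a = Nat.digitChar b) : a = b := by
  interval_cases a <;> interval_cases b <;> simp_all [Nat.digitChar]

theorem toDigits10_inj : ∀ (m n : Nat), Nat.toDigits 10 m = Nat.toDigits 10 n → m = n := by
  intro m
  induction m using Nat.strong_induction_on with
  | _ m ih =>
    intro n h
    rw [Nat.toDigits_eq_if (by norm_num), Nat.toDigits_eq_if (b := 10) (by norm_num) (n := n)] at h
    by_cases hm : m < 10 <;> by_cases hn : n < 10 <;> simp [hm, hn] at h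
    · exact digitChar_inj hm hn h
    · have h1 : 0 < (Nat.toDigits 10 (n / 10)).length := Nat.length_toDigits_pos
      have h2 := congrArg List.length h
      simp at h2
      simp [h2] at h1
    · have h1 : 0 < (Nat.toDigits 10 (m / 10)).length := Nat.length_toDigits_pos
      have h2 := congrArg List.length h
      simp at h2
      simp [h2] at h1
    · have hd : m / 10 = n / 10 := ih (m / 10) (by omega) _ h.1
      have hm2 : m % 10 = n % 10 :=
        digitChar_inj (Nat.mod_lt _ (by norm_num)) (Nat.mod_lt _ (by norm_num)) h.2
      omega

theorem toStr_inj {a b : Int} (h : PySem.Int.toStr a = PySem.Int.toStr b) : a = b := by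
  have h' : PySem.Int.toChars a = PySem.Int.toChars b := by
    rw [← PySem.Int.toList_toStr, ← PySem.Int.toList_toStr, h]
  unfold PySem.Int.toChars at h'
  by_cases ha : a < 0 <;> by_cases hb : b < 0 <;> simp [ha, hb] at h'
  · have := toDigits10_inj _ _ h'
    omega
  · cases hd : Nat.toDigits 10 b.toNat with
    | nil => have := @Nat.length_toDigits_pos 10 b.toNat; simp [hd] at this
    | cons c cs =>
      rw [hd] at h'
      have hc : c = '-' := (List.cons_eq_cons.mp h').1.symm
      have hdig := Nat.isDigit_of_mem_toDigits (b := 10) (n := b.toNat) (by norm_num) (by norm_num) (hd ▸ List.mem_cons_self)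
      rw [hc] at hdig
      simp [Char.isDigit] at hdig
  · cases hd : Nat.toDigits 10 a.toNat with
    | nil => have := @Nat.length_toDigits_pos 10 a.toNat; simp [hd] at this
    | cons c cs =>
      rw [hd] at h'
      have hc : c = '-' := (List.cons_eq_cons.mp h'.symm).1.symm
      have hdig := Nat.isDigit_of_mem_toDigits (b := 10) (n := a.toNat) (by norm_num) (by norm_num) (hd ▸ List.mem_cons_self)
      rw [hc] at hdig
      simp [Char.isDigit] at hdig
  · have := toDigits10_inj _ _ h'
    omega

theorem loop_eq (t : Int) : ∀ (todos : List (List (String × String))) (i : Int),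
    find_todo_index_by_id_loop todos (PySem.Int.toStr t) i =
      if i ≤ t ∧ t < i + (todos.length : Int) then t - 1 else -1 := by
  intro todos
  induction todos with
  | nil =>
    intro i
    simp only [find_todo_index_by_id_loop, List.length_nil, Nat.cast_zero]
    rw [if_neg (by omega)]
  | cons x rest ih =>
    intro i
    unfold find_todo_index_by_id_loop
    by_cases heq : PySem.Int.toStr i = PySem.Int.toStr t
    · have ht : i = t := toStr_inj heq
      subst ht
      simp only [BEq.rfl, if_true, List.length_cons]
      rw [if_pos (by push_cast; omega)]
    · have hne : i ≠ t := fun h => heq (by rw [h])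
      rw [if_neg (by simp [heq]), ih (i + 1)]
      simp only [List.length_cons]
      split_ifs with h1 h2 h2 <;> first | rfl | (exfalso; push_cast at h1 h2; omega)

-- ===== VERDICT (by name: the statement is the Claim_ definition above) =====
theorem find_todo_index_by_id_py_spec : Claim_equal_find_todo_index_by_id_py := by
  intro todos todo_id _
  unfold Spec_find_todo_index_by_id_py find_todo_index_by_id_py find_todo_index_by_id_py_alt
  by_cases hd : PySem.Str.strIsdigit (PySem.Str.strip todo_id)
  · simp only [hd, Bool.not_true, if_true]
    generalize (PySem.Int.ofStr? (PySem.Str.strip todo_id)).getD 0 = t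
    rw [loop_eq t todos 1]
    split_ifs <;> first | rfl | omega | simp_all
  · rw [Bool.not_eq_true, PySem.Str.strIsdigit_eq, PySem.Str.toList_strip] at hd
    simp [hd]
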